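-- pv_equiv track=rewrite | github.com/MartinMashalov/StatsPlay | StatsPlayMatchLevel-1/StatsPlayMatchLevel/StatsPlayMatchLevel/spiders/nba_scraper.py | _filter_reference_keys
-- ===== SOURCE A (Python) =====
-- def _filter_reference_keys(modes: list, reference_keys: dict):
--     """filter the reference keys for the player parsing function"""
--
--     # loop through each of the reference keys
--     new_dict: dict = {}
--     for key, values in reference_keys.items():
--         new_mapping: dict = {player_key: value for player_key, value in values.items() if value in modes}
--
--         # reorder the indices of dictionary
--         output_mapping: dict = {}
--         for key_id, new_key in zip(new_mapping, [i for i in range(1, len(new_mapping) + 1)]):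
--             output_mapping[new_key] = new_mapping[key_id]
--
--         new_dict[key] = output_mapping
--
--     return new_dict
-- ===== SOURCE B (Python) =====
-- def _filter_reference_keys(modes: list, reference_keys: dict):
--     """filter the reference keys for the player parsing function"""
--     # Recursive decomposition: one structural recursion per level, threading the
--     # next index through the recursion instead of filtering then renumbering.
--
--     def number(vals: list, k: int) -> dict:
--         # assoc survivors of vals with k, k+1, ... in one recursive pass
--         if not vals:
--             return {}
--         v, rest = vals[0], vals[1:]
--         if v in modes:
--             d = {k: v}
--             d.update(number(rest, k + 1))
--             return d
--         return number(rest, k)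
--
--     def walk(items: list) -> dict:
--         if not items:
--             return {}
--         (key, values), rest = items[0], items[1:]
--         d = {key: number(list(values.values()), 1)}
--         d.update(walk(rest))
--         return d
--
--     return walk(list(reference_keys.items()))
-- ===== Notes on version B (the rewrite author's own statement) =====
-- stated objective: alternative
-- what changed: B replaces A's staged filter-then-renumber loops over intermediate dicts (plus the zip/range relabelling with repeated lookups) by two structural recursions: an inner recursion that threads the next integer key through itself while consuming the value list, and an outer recursion over the items, so no intermediate player-keyed table or renumbering pass exists.
import Mathlib
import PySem

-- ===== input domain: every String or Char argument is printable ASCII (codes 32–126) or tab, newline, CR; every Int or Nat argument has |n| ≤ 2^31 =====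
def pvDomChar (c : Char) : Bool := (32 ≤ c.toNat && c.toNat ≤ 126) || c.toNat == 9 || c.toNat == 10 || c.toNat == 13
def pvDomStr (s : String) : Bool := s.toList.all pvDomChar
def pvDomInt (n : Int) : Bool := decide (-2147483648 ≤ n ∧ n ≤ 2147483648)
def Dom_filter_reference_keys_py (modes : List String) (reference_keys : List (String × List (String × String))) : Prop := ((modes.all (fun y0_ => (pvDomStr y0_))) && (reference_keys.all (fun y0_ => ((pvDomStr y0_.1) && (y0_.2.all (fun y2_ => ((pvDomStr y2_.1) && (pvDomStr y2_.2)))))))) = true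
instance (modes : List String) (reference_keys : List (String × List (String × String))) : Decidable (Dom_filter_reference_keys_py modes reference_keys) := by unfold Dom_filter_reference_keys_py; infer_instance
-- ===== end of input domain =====

-- B replaces A's staged filter-then-renumber loops (intermediate dict + zip/range relabelling)
-- by two structural recursions threading the next index; objective: alternative (same cost).

-- ===== PORT A =====
-- dicts are PySem.Dict (insertion order, duplicate keys overwrite in place), exactly Python's dict.
def filter_reference_keys_py (modes : List String) (reference_keys : List (String × List (String × String))) : List (String × List (Int × String)) :=
  let rd := PySem.Dict.ofList reference_keys
  (rd.items.foldl (fun new_dict kv =>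
      let vd := PySem.Dict.ofList kv.2
      -- new_mapping = {player_key: value for player_key, value in values.items() if value in modes}
      let new_mapping := vd.items.foldl
        (fun m pv => if decide (pv.2 ∈ modes) then m.insert pv.1 pv.2 else m)
        (PySem.Dict.empty : PySem.Dict String String)
      -- for key_id, new_key in zip(new_mapping, range(1, len(new_mapping)+1)): output_mapping[new_key] = new_mapping[key_id]
      -- key_id is always a key of new_mapping, so the lookup new_mapping[key_id] never raises; getD "" is exact here.
      let output_mapping := (new_mapping.keys.zip (PySem.List.pyRange 1 ((new_mapping.size : Int) + 1) 1)).foldl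
        (fun om kn => om.insert kn.2 (new_mapping.getD kn.1 ""))
        (PySem.Dict.empty : PySem.Dict Int String)
      new_dict.insert kv.1 output_mapping.items)
    (PySem.Dict.empty : PySem.Dict String (List (Int × String)))).items

-- ===== PORT B =====
-- number(vals, k): the built dict is {k: v} updated with number(rest, k+1), whose keys are all
-- ≥ k+1, so the update appends fresh keys: as an association list it is exactly the cons below.
def pvNumberB (modes : List String) : List String → Int → List (Int × String)
  | [], _ => []
  | v :: rest, k =>
      if decide (v ∈ modes) then (k, v) :: pvNumberB modes rest (k + 1)
      else pvNumberB modes rest k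

-- walk(items): {key: number(...)} updated with walk(rest); items come from a dict, so key is
-- fresh for walk(rest)'s keys and the update appends: as an association list it is this cons.
def pvWalkB (modes : List String) : List (String × List (String × String)) → List (String × List (Int × String))
  | [] => []
  | kv :: rest => (kv.1, pvNumberB modes (PySem.Dict.ofList kv.2).values 1) :: pvWalkB modes rest

def filter_reference_keys_py_alt (modes : List String) (reference_keys : List (String × List (String × String))) : List (String × List (Int × String)) :=
  pvWalkB modes (PySem.Dict.ofList reference_keys).items

-- ===== PRECONDITION & SPEC =====
def Spec_filter_reference_keys_py (modes : List String) (reference_keys : List (String × List (String × String))) (out : List (String × List (Int × String))) : Prop := out = filter_reference_keys_py_alt modes reference_keys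
instance (modes : List String) (reference_keys : List (String × List (String × String))) (out : List (String × List (Int × String))) : Decidable (Spec_filter_reference_keys_py modes reference_keys out) := by unfold Spec_filter_reference_keys_py; infer_instance

-- ===== CLAIM (what is proved, stated in full; the proofs are below) =====
def Claim_equal_filter_reference_keys_py : Prop := ∀ (modes : List String) (reference_keys : List (String × List (String × String))), Dom_filter_reference_keys_py modes reference_keys → Spec_filter_reference_keys_py modes reference_keys (filter_reference_keys_py modes reference_keys)

-- ===== LEMMAS AND PROOFS =====

-- B's index-threading recursion is enumerate of the filtered list
theorem pvNumberB_eq_enumerate (modes : List String) :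
    ∀ (vals : List String) (k : Int),
      pvNumberB modes vals k = PySem.List.enumerate (vals.filter (fun v => decide (v ∈ modes))) k := by
  intro vals
  induction vals with
  | nil => intro k; rfl
  | cons v rest ih =>
    intro k
    by_cases h : v ∈ modes
    · simp [pvNumberB, h, PySem.List.enumerate_cons, ih]
    · simp [pvNumberB, h, ih]

theorem pvWalkB_eq_map (modes : List String) :
    ∀ (l : List (String × List (String × String))),
      pvWalkB modes l = l.map (fun kv => (kv.1, pvNumberB modes (PySem.Dict.ofList kv.2).values 1)) := by
  intro l
  induction l with
  | nil => rfl
  | cons kv rest ih => simp [pvWalkB, ih]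

-- a foldl whose step is a no-op outside p is the foldl over the filtered list
theorem foldl_if_filter {α β : Type} (p : α → Bool) (f : β → α → β) :
    ∀ (l : List α) (init : β),
      l.foldl (fun acc x => if p x then f acc x else acc) init = (l.filter p).foldl f init := by
  intro l
  induction l with
  | nil => intro init; rfl
  | cons x xs ih =>
    intro init
    by_cases h : p x = true
    · simp [h, ih]
    · simp [h, ih]

-- the inner body of A equals B's fused index-threading pass, for one values-dict
theorem inner_eq (modes : List String) (values : List (String × String)) :
    (let vd := PySem.Dict.ofList values
     let new_mapping := vd.items.foldl
        (fun m pv => if decide (pv.2 ∈ modes) then m.insert pv.1 pv.2 else m)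
        (PySem.Dict.empty : PySem.Dict String String)
     ((new_mapping.keys.zip (PySem.List.pyRange 1 ((new_mapping.size : Int) + 1) 1)).foldl
        (fun om kn => om.insert kn.2 (new_mapping.getD kn.1 ""))
        (PySem.Dict.empty : PySem.Dict Int String)).items)
    = pvNumberB modes (PySem.Dict.ofList values).values 1 := by
  rw [pvNumberB_eq_enumerate]
  simp only []
  set vd := PySem.Dict.ofList values with hvd
  set L := vd.items.filter (fun pv => decide (pv.2 ∈ modes)) with hL
  have hnodupK : (vd.items.map Prod.fst).Nodup := PySem.Dict.nodup_keys_ofList values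
  have hLnodup : (L.map Prod.fst).Nodup :=
    hnodupK.sublist (List.Sublist.map Prod.fst List.filter_sublist)
  have hfold : vd.items.foldl
        (fun m pv => if decide (pv.2 ∈ modes) then m.insert pv.1 pv.2 else m)
        (PySem.Dict.empty : PySem.Dict String String)
      = L.foldl (fun m pv => m.insert pv.1 pv.2) PySem.Dict.empty :=
    foldl_if_filter _ _ _ _
  rw [hfold]
  set nm := L.foldl (fun m pv => m.insert pv.1 pv.2)
      (PySem.Dict.empty : PySem.Dict String String) with hnm
  have hitems : nm.items = L := by
    have := PySem.Dict.items_foldl_insert_fresh (l := L) (k := Prod.fst) (v := Prod.snd)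
      (d := PySem.Dict.empty) (by intro a _; simp) hLnodup
    simpa [hnm] using this
  have hkeys : nm.keys = L.map Prod.fst := by
    simp only [PySem.Dict.keys, hitems]
  have hsize : nm.size = L.length := by
    simp only [PySem.Dict.size, hitems]
  have hlenR : (PySem.List.pyRange 1 ((L.length : Int) + 1) 1).length = L.length := by
    rw [PySem.List.length_pyRange_one]; omega
  have hZlen : (nm.keys.zip (PySem.List.pyRange 1 ((nm.size : Int) + 1) 1)).length = L.length := by
    simp [hkeys, hsize, hlenR]
  have hZsnd : (nm.keys.zip (PySem.List.pyRange 1 ((nm.size : Int) + 1) 1)).map Prod.snd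
      = PySem.List.pyRange 1 ((L.length : Int) + 1) 1 := by
    rw [hkeys, hsize]
    exact List.map_snd_zip (by simp [hlenR])
  have hZnodup : ((nm.keys.zip (PySem.List.pyRange 1 ((nm.size : Int) + 1) 1)).map Prod.snd).Nodup := by
    rw [hZsnd]; exact PySem.List.nodup_pyRange_one 1 _
  have hout := PySem.Dict.items_foldl_insert_fresh
      (l := nm.keys.zip (PySem.List.pyRange 1 ((nm.size : Int) + 1) 1))
      (k := Prod.snd) (v := fun kn => nm.getD kn.1 "")
      (d := (PySem.Dict.empty : PySem.Dict Int String)) (by intro a _; simp) hZnodup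
  rw [show (fun (om : PySem.Dict Int String) (kn : String × Int) => om.insert kn.2 (nm.getD kn.1 "")) =
        (fun d a => d.insert a.2 (nm.getD a.1 "")) from rfl]
  rw [hout, show (PySem.Dict.empty : PySem.Dict Int String).items = [] from rfl]
  have hvals : vd.values.filter (fun v => decide (v ∈ modes)) = L.map Prod.snd := by
    simp only [PySem.Dict.values, hL]
    rw [List.filter_map]
    rfl
  rw [hvals]
  simp only [List.nil_append]
  apply List.ext_getElem
  · simp [hZlen, PySem.List.length_enumerate]
  · intro i h1 h2
    have hiL : i < L.length := by simpa [hZlen] using h1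
    have hiK : i < nm.keys.length := by simp [hkeys, hiL]
    have hiR : i < (PySem.List.pyRange 1 ((nm.size : Int) + 1) 1).length := by
      rw [hsize, hlenR]; exact hiL
    rw [List.getElem_map, List.getElem_zip, PySem.List.getElem_enumerate,
        PySem.List.getElem_pyRange_one]
    have hkey : nm.keys[i] = L[i].1 := by simp [hkeys]
    have hval : nm.getD L[i].1 "" = L[i].2 := by
      apply PySem.Dict.getD_of_mem_items
      · rw [hitems]
        exact List.getElem_mem hiL
      · show nm.keys.Nodup
        rw [hkeys]; exact hLnodup
    simp [hkey, hval]

-- ===== VERDICT (by name: the statement is the Claim_ definition above) =====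
theorem filter_reference_keys_py_spec : Claim_equal_filter_reference_keys_py := by
  intro modes reference_keys _
  unfold Spec_filter_reference_keys_py filter_reference_keys_py filter_reference_keys_py_alt
  rw [pvWalkB_eq_map]
  simp only []
  set rd := PySem.Dict.ofList reference_keys with hrd
  have hnodup : (rd.items.map Prod.fst).Nodup := PySem.Dict.nodup_keys_ofList reference_keys
  have hout := PySem.Dict.items_foldl_insert_fresh
      (l := rd.items) (k := Prod.fst)
      (v := fun kv =>
        (let vd := PySem.Dict.ofList kv.2
         let new_mapping := vd.items.foldl
            (fun m pv => if decide (pv.2 ∈ modes) then m.insert pv.1 pv.2 else m)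
            (PySem.Dict.empty : PySem.Dict String String)
         ((new_mapping.keys.zip (PySem.List.pyRange 1 ((new_mapping.size : Int) + 1) 1)).foldl
            (fun om kn => om.insert kn.2 (new_mapping.getD kn.1 ""))
            (PySem.Dict.empty : PySem.Dict Int String)).items))
      (d := (PySem.Dict.empty : PySem.Dict String (List (Int × String))))
      (by intro a _; simp) hnodup
  rw [hout, show (PySem.Dict.empty : PySem.Dict String (List (Int × String))).items = [] from rfl]
  simp only [List.nil_append]
  apply List.map_congr_left
  intro kv _
  exact congrArg (fun t => (kv.1, t)) (inner_eq modes kv.2)
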